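-- pv_equiv track=rewrite | github.com/iamnigellee/PPT-style-wow | skills/ppt-style-wow/scripts/design_bridge.py | _extract_style_objective
-- ===== SOURCE A (Python) =====
-- def _extract_style_objective(visual_theme_section: str) -> str:
--     """Pull the atmosphere/intro paragraph from Section 1."""
--     lines = visual_theme_section.splitlines()
--     paragraphs = []
--     current: list[str] = []
--     for line in lines:
--         stripped = line.strip()
--         if stripped:
--             current.append(stripped)
--         else:
--             if current:
--                 paragraphs.append(" ".join(current))
--                 current = []
--     if current:
--         paragraphs.append(" ".join(current))
--     # Return first non-empty paragraph (the atmosphere paragraph)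
--     for para in paragraphs:
--         if para.startswith("###") or para.startswith("**"):
--             continue
--         if para.startswith("-"):
--             continue
--         return para
--     return visual_theme_section.strip()
-- ===== SOURCE B (Python) =====
-- def _extract_style_objective(visual_theme_section: str) -> str:
--     """Single fused pass: close and test each paragraph as soon as it ends,
--     returning immediately; no intermediate paragraphs list is built."""
--     def _qualifies(para: str) -> bool:
--         return not (para.startswith("###") or para.startswith("**")
--                     or para.startswith("-"))
--
--     current: list[str] = []
--     for line in visual_theme_section.splitlines():
--         stripped = line.strip()
--         if stripped:
--             current.append(stripped)
--         elif current:
--             para = " ".join(current)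
--             if _qualifies(para):
--                 return para
--             current = []
--     if current:
--         para = " ".join(current)
--         if _qualifies(para):
--             return para
--     return visual_theme_section.strip()
-- ===== Notes on version B (the rewrite author's own statement) =====
-- stated objective: alternative
-- what changed: Instead of building the full paragraphs list and then scanning it, B fuses both passes: it tests each paragraph against the skip prefixes the moment a blank line (or the end) closes it and returns immediately, never materialising a paragraphs list.
import Mathlib
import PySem

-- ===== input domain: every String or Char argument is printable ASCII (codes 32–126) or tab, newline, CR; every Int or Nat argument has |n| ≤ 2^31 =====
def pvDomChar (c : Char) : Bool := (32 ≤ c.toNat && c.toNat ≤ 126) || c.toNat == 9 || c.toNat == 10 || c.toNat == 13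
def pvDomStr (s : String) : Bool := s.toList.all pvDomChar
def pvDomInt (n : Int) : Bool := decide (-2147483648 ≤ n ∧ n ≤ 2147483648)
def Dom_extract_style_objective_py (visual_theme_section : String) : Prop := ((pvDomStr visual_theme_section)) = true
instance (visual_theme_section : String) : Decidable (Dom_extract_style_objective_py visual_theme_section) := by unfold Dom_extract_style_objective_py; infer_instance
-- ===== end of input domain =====

-- B replaces A's build-then-scan with one fused pass that tests each paragraph
-- as it closes and returns early (alternative decomposition; same cost).

-- ===== PORT A =====
-- the body of A's line loop (one step of the for-loop over lines)
def pvStepA (acc : List String × List String) (line : String) : List String × List String :=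
  let stripped := PySem.Str.strip line
  if stripped ≠ "" then (acc.1, acc.2 ++ [stripped])
  else if acc.2 ≠ [] then (acc.1 ++ [PySem.Str.join " " acc.2], [])
  else acc

-- A's second loop: return first paragraph not starting with ###/**/-, else fallback
def pvFirstPara (paragraphs : List String) (fallback : String) : String :=
  match paragraphs with
  | [] => fallback
  | para :: rest =>
    if PySem.Str.startswith para "###" || PySem.Str.startswith para "**" then
      pvFirstPara rest fallback
    else if PySem.Str.startswith para "-" then
      pvFirstPara rest fallback
    else para

def extract_style_objective_py (visual_theme_section : String) : String :=
  let lines := PySem.Str.splitlines visual_theme_section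
  let st := lines.foldl pvStepA ([], [])
  let paragraphs := if st.2 ≠ [] then st.1 ++ [PySem.Str.join " " st.2] else st.1
  pvFirstPara paragraphs (PySem.Str.strip visual_theme_section)

-- ===== PORT B =====
def pvQualifies (para : String) : Bool :=
  !(PySem.Str.startswith para "###" || PySem.Str.startswith para "**" ||
    PySem.Str.startswith para "-")

-- B's single fused pass: close and test each paragraph as soon as it ends
def pvScanB (lines : List String) (current : List String) : Option String :=
  match lines with
  | [] =>
    if current ≠ [] then
      let para := PySem.Str.join " " current
      if pvQualifies para then some para else none
    else none
  | line :: rest =>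
    let stripped := PySem.Str.strip line
    if stripped ≠ "" then pvScanB rest (current ++ [stripped])
    else if current ≠ [] then
      let para := PySem.Str.join " " current
      if pvQualifies para then some para else pvScanB rest []
    else pvScanB rest []

def extract_style_objective_py_alt (visual_theme_section : String) : String :=
  (pvScanB (PySem.Str.splitlines visual_theme_section) []).getD
    (PySem.Str.strip visual_theme_section)

-- ===== PRECONDITION & SPEC =====
def Spec_extract_style_objective_py (visual_theme_section : String) (out : String) : Prop := out = extract_style_objective_py_alt visual_theme_section
instance (visual_theme_section : String) (out : String) : Decidable (Spec_extract_style_objective_py visual_theme_section out) := by unfold Spec_extract_style_objective_py; infer_instance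

-- ===== CLAIM (what is proved, stated in full; the proofs are below) =====
def Claim_equal_extract_style_objective_py : Prop := ∀ (visual_theme_section : String), Dom_extract_style_objective_py visual_theme_section → Spec_extract_style_objective_py visual_theme_section (extract_style_objective_py visual_theme_section)

-- ===== LEMMAS AND PROOFS =====

-- the paragraph accumulator only ever grows by appending on the right
theorem pvFoldA_shift (lines : List String) (p c : List String) :
    lines.foldl pvStepA (p, c) =
      (p ++ (lines.foldl pvStepA ([], c)).1, (lines.foldl pvStepA ([], c)).2) := by
  induction lines generalizing p c with
  | nil => simp
  | cons line rest ih =>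
    simp only [List.foldl_cons, pvStepA]
    by_cases h1 : PySem.Str.strip line ≠ ""
    · simp only [if_pos h1]
      exact ih p (c ++ [PySem.Str.strip line])
    · by_cases h2 : c ≠ []
      · simp only [if_neg h1, if_pos h2, List.nil_append]
        rw [ih (p ++ [PySem.Str.join " " c]) [], ih [PySem.Str.join " " c] []]
        simp
      · simp only [if_neg h1, if_neg h2]
        exact ih p c

theorem pvFirstPara_append (p q : List String) (fb : String) :
    pvFirstPara (p ++ q) fb = pvFirstPara p (pvFirstPara q fb) := by
  induction p with
  | nil => simp [pvFirstPara]
  | cons x xs ih =>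
    simp only [List.cons_append, pvFirstPara]
    split_ifs <;> simp [ih]

theorem pvFirstPara_single (x : String) (fb : String) :
    pvFirstPara [x] fb = if pvQualifies x then x else fb := by
  simp only [pvFirstPara, pvQualifies]
  split_ifs with h1 h2 h3 h3 <;> simp_all

-- main invariant: A's collect-then-scan started from state ([], c)
-- equals B's fused scan started with current paragraph c
theorem pvKey (lines : List String) (c : List String) (fb : String) :
    pvFirstPara
      (if (lines.foldl pvStepA ([], c)).2 ≠ [] then
        (lines.foldl pvStepA ([], c)).1 ++
          [PySem.Str.join " " (lines.foldl pvStepA ([], c)).2]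
       else (lines.foldl pvStepA ([], c)).1) fb =
      (pvScanB lines c).getD fb := by
  induction lines generalizing c with
  | nil =>
    simp only [List.foldl_nil, pvScanB]
    by_cases hc : c ≠ []
    · rw [if_pos hc, if_pos hc, List.nil_append, pvFirstPara_single]
      by_cases hq : pvQualifies (PySem.Str.join " " c) = true
      · simp [hq]
      · simp [hq]
    · rw [if_neg hc, if_neg hc]
      simp [pvFirstPara]
  | cons line rest ih =>
    simp only [List.foldl_cons, pvStepA, pvScanB]
    by_cases h1 : PySem.Str.strip line ≠ ""
    · simp only [if_pos h1]
      exact ih (c ++ [PySem.Str.strip line])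
    · by_cases h2 : c ≠ []
      · simp only [if_neg h1, if_pos h2, List.nil_append]
        rw [pvFoldA_shift rest [PySem.Str.join " " c] []]
        have hthen :
            (if ((rest.foldl pvStepA ([], [])).2 : List String) ≠ [] then
              ([PySem.Str.join " " c] ++ (rest.foldl pvStepA ([], [])).1) ++
                [PySem.Str.join " " (rest.foldl pvStepA ([], [])).2]
             else [PySem.Str.join " " c] ++ (rest.foldl pvStepA ([], [])).1) =
            [PySem.Str.join " " c] ++
              (if ((rest.foldl pvStepA ([], [])).2 : List String) ≠ [] then
                (rest.foldl pvStepA ([], [])).1 ++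
                  [PySem.Str.join " " (rest.foldl pvStepA ([], [])).2]
               else (rest.foldl pvStepA ([], [])).1) := by
          split_ifs <;> simp
        rw [hthen, pvFirstPara_append, pvFirstPara_single]
        by_cases hq : pvQualifies (PySem.Str.join " " c) = true
        · simp [hq]
        · simp only [if_neg hq]
          exact ih []
      · simp only [if_neg h1, if_neg h2]
        have hc : c = [] := not_ne_iff.mp h2
        subst hc
        exact ih []

-- ===== VERDICT (by name: the statement is the Claim_ definition above) =====
theorem extract_style_objective_py_spec : Claim_equal_extract_style_objective_py := by
  intro s _
  unfold Spec_extract_style_objective_py extract_style_objective_py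
    extract_style_objective_py_alt
  exact pvKey (PySem.Str.splitlines s) [] (PySem.Str.strip s)
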